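-- pv_equiv track=rewrite | github.com/nxp-imx/gtec-demo-framework | .Config/FslBuildGen/Util.py | ChangeToCMakeVariables
-- ===== SOURCE A (Python) =====
-- def ChangeToCMakeVariables(path: str) -> str:
--     index = path.find("$(")
--     if index < 0:
--         return path
--     endIndex = path.find(")")
--     if endIndex < 0:
--         return path
--     start = path[:index]
--     envName = path[index+2:endIndex]
--     end = path[endIndex+1:]
--     path = "%s${%s}%s" % (start, envName, end)
--     return ChangeToCMakeVariables(path)
-- ===== SOURCE B (Python) =====
-- def ChangeToCMakeVariables(path: str) -> str:
--     # Each $(VAR) reference is made of one "$(" opener and one ")" closer,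
--     # so convert as many openers and closers as can be paired up.
--     pairs = min(path.count("$("), path.count(")"))
--     return path.replace("$(", "${", pairs).replace(")", "}", pairs)
-- ===== Notes on version B (the rewrite author's own statement) =====
-- stated objective: idiomatic
-- what changed: A recursively rescans and rebuilds the whole string, rewriting one variable reference per pass; B computes once how many opener/closer tokens can be paired and issues two count-limited str.replace calls.
import Mathlib
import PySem

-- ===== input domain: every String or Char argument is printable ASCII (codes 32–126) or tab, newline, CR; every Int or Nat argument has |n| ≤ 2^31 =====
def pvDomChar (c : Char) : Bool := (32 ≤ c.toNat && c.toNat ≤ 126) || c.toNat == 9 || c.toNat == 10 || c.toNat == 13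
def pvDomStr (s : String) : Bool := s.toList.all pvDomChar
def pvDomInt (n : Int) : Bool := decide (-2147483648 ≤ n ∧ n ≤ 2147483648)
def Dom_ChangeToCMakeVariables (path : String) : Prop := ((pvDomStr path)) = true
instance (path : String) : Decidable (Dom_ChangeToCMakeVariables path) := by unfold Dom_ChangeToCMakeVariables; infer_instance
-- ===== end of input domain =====

-- B replaces A's repeated rescan-and-rebuild recursion by two count-limited str.replace
-- passes with the pair count computed once (objective: idiomatic; outside Pre_, A never
-- returns — excluded).


-- ===== PORT A =====
-- A's recursion, transliterated on the list side (PySem.Chars/PySem.List are the list-side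
-- meanings of the Python str operations; "%s${%s}%s" % ... is the concatenation).  The Nat
-- argument is pure totalization fuel (Python A has none): under Pre_ the recursion makes at
-- most length+1 calls, so the initial fuel length+1 is never exhausted and the port computes
-- exactly what A computes there.
def goA : Nat → List Char → List Char
  | 0, p => p
  | fuel + 1, p =>
    let index := PySem.Chars.find p ['$', '(']
    if index < 0 then p
    else
      let endIndex := PySem.Chars.find p [')']
      if endIndex < 0 then p
      else
        let start := PySem.List.slice p none (some index)
        let envName := PySem.List.slice p (some (index + 2)) (some endIndex)
        let endPart := PySem.List.slice p (some (endIndex + 1)) none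
        goA fuel (start ++ ('$' :: '{' :: envName) ++ ('}' :: endPart))

def ChangeToCMakeVariables (path : String) : String :=
  String.ofList (goA (path.toList.length + 1) path.toList)

-- ===== PORT B =====
-- Hand port of Python's str.replace(old, new, count): replace the first `count`
-- non-overlapping occurrences of `old`, scanning left to right.  Exact for a nonempty
-- `old` and a nonnegative count, which is how Source B calls it.
def pyReplaceN (old new : List Char) : Nat → List Char → List Char
  | _, [] => []
  | 0, l => l
  | n + 1, a :: rest =>
    if old.isPrefixOf (a :: rest) then
      new ++ pyReplaceN old new n (rest.drop (old.length - 1))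
    else a :: pyReplaceN old new (n + 1) rest
  termination_by _ l => l.length
  decreasing_by
    · simpa using Nat.lt_succ_of_le (List.length_drop_le _ _)
    · simp

def ChangeToCMakeVariables_alt (path : String) : String :=
  let pairs := min (PySem.Chars.count path.toList ['$', '(']) (PySem.Chars.count path.toList [')'])
  String.ofList
    (pyReplaceN [')'] ['}'] pairs (pyReplaceN ['$', '('] ['$', '{'] pairs path.toList))

-- ===== PRECONDITION & SPEC =====
-- positions (in increasing order) at which the pattern `pat` occurs in `l`
def occIdxs (pat : List Char) (l : List Char) : List Nat :=
  (List.range l.length).filter (fun j => pat.isPrefixOf (l.drop j))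

-- Pre_: the k-th "$(" occurrence lies before the k-th ")" occurrence, for every k up to the
-- smaller count.  Exactly on these inputs A terminates; on every other input A's string
-- strictly grows on each recursive call and A dies with RecursionError/MemoryError, so A
-- never returns a value outside Pre_.
def Pre_ChangeToCMakeVariables (path : String) : Prop :=
  ∀ pr ∈ (occIdxs ['$', '('] path.toList).zip (occIdxs [')'] path.toList), pr.1 < pr.2

instance (path : String) : Decidable (Pre_ChangeToCMakeVariables path) := by
  unfold Pre_ChangeToCMakeVariables; infer_instance

def pvWitness_ChangeToCMakeVariables : String := "$(A)/x/$(B)"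

def Spec_ChangeToCMakeVariables (path : String) (out : String) : Prop := out = ChangeToCMakeVariables_alt path
instance (path : String) (out : String) : Decidable (Spec_ChangeToCMakeVariables path out) := by unfold Spec_ChangeToCMakeVariables; infer_instance

-- ===== CLAIM (what is proved, stated in full; the proofs are below) =====
def Claim_equal_ChangeToCMakeVariables : Prop := ∀ (path : String), Dom_ChangeToCMakeVariables path → Pre_ChangeToCMakeVariables path → Spec_ChangeToCMakeVariables path (ChangeToCMakeVariables path)

-- ===== LEMMAS AND PROOFS =====

-- proof-only helper: the simultaneous one-pass scan; `o`/`c` are the remaining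
-- open/close replacement budgets.  Below it is proved equal to A's recursion (goA_eq)
-- and to B's two sequential replace passes (replace_replace_eq_altScan).
def altScan : Nat → Nat → List Char → List Char
  | _, _, [] => []
  | o, c, '$' :: '(' :: rest =>
    if 0 < o then '$' :: '{' :: altScan (o - 1) c rest
    else '$' :: '(' :: altScan o c rest
  | o, c, ')' :: rest =>
    if 0 < c then '}' :: altScan o (c - 1) rest
    else ')' :: altScan o c rest
  | o, c, a :: rest => a :: altScan o c rest

theorem altScan_eq_open (o c : Nat) (rest : List Char) :
    altScan o c ('$' :: '(' :: rest)
      = if 0 < o then '$' :: '{' :: altScan (o - 1) c rest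
        else '$' :: '(' :: altScan o c rest := by rw [altScan]

theorem altScan_eq_close (o c : Nat) (rest : List Char) :
    altScan o c (')' :: rest)
      = if 0 < c then '}' :: altScan o (c - 1) rest
        else ')' :: altScan o c rest := by rw [altScan]

theorem altScan_eq_other (o c : Nat) (a : Char) (rest : List Char)
    (h1 : ¬ (a = '$' ∧ rest.head? = some '(')) (h2 : a ≠ ')') :
    altScan o c (a :: rest) = a :: altScan o c rest := by
  match a, rest with
  | ')', r => exact absurd rfl h2
  | '$', '(' :: r => exact absurd ⟨rfl, rfl⟩ h1
  | a, r =>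
    rw [altScan]
    · intro rest' ha hr
      exact h1 ⟨ha, by rw [hr]; rfl⟩
    · intro ha
      exact h2 ha

-- equation lemmas for the hand-ported replace
theorem pyReplaceN_nil (old new : List Char) (n : Nat) :
    pyReplaceN old new n [] = [] := by cases n <;> rw [pyReplaceN]

theorem pyReplaceN_zero (old new : List Char) (l : List Char) :
    pyReplaceN old new 0 l = l := by cases l <;> simp [pyReplaceN]

theorem pyReplaceN_succ (old new : List Char) (n : Nat) (a : Char) (rest : List Char) :
    pyReplaceN old new (n + 1) (a :: rest)
      = if old.isPrefixOf (a :: rest) then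
          new ++ pyReplaceN old new n (rest.drop (old.length - 1))
        else a :: pyReplaceN old new (n + 1) rest := by rw [pyReplaceN]

-- pass-through of a non-matching head character, for both patterns
theorem replaceClose_cons (c : Nat) (a : Char) (l : List Char) (ha : a ≠ ')') :
    pyReplaceN [')'] ['}'] c (a :: l) = a :: pyReplaceN [')'] ['}'] c l := by
  cases c with
  | zero => rw [pyReplaceN_zero, pyReplaceN_zero]
  | succ c' =>
    rw [pyReplaceN_succ, if_neg]
    intro h
    rcases List.cons_prefix_cons.mp (List.isPrefixOf_iff_prefix.mp h) with ⟨h1, -⟩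
    exact ha h1.symm

theorem replaceOpen_cons (o : Nat) (a : Char) (l : List Char)
    (h : ¬ (a = '$' ∧ l.head? = some '(')) :
    pyReplaceN ['$', '('] ['$', '{'] o (a :: l) = a :: pyReplaceN ['$', '('] ['$', '{'] o l := by
  cases o with
  | zero => rw [pyReplaceN_zero, pyReplaceN_zero]
  | succ o' =>
    rw [pyReplaceN_succ, if_neg]
    intro hp
    rcases List.cons_prefix_cons.mp (List.isPrefixOf_iff_prefix.mp hp) with ⟨h1, h2⟩
    cases l with
    | nil => simp at h2
    | cons b t =>
      rcases List.cons_prefix_cons.mp h2 with ⟨hb, -⟩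
      exact h ⟨h1.symm, by simp [hb.symm]⟩

-- B's two sequential count-limited passes compute the simultaneous scan
theorem replace_replace_eq_altScan (o c : Nat) (l : List Char) :
    pyReplaceN [')'] ['}'] c (pyReplaceN ['$', '('] ['$', '{'] o l) = altScan o c l := by
  generalize hn : l.length = n
  induction n using Nat.strong_induction_on generalizing l o c with
  | _ n ih =>
    cases l with
    | nil => rw [pyReplaceN_nil, pyReplaceN_nil, altScan]
    | cons a rest =>
      by_cases h1 : a = '$' ∧ rest.head? = some '('
      · obtain ⟨rfl, hh⟩ := h1
        obtain ⟨r, rfl⟩ : ∃ r, rest = '(' :: r := by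
          cases rest with
          | nil => simp at hh
          | cons b r => simp at hh; exact ⟨r, by simp [hh]⟩
        have hr : r.length < n := by simp at hn; omega
        rw [altScan_eq_open]
        cases o with
        | zero =>
          rw [pyReplaceN_zero, if_neg (by omega),
            replaceClose_cons _ _ _ (by decide), replaceClose_cons _ _ _ (by decide)]
          have := ih r.length hr 0 c r rfl
          rw [pyReplaceN_zero] at this
          rw [this]
        | succ o' =>
          rw [pyReplaceN_succ, if_pos (by simp [List.isPrefixOf]), if_pos (by omega)]
          have hdrop : ('(' :: r).drop ((['$', '('] : List Char).length - 1) = r := rfl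
          rw [hdrop]
          show pyReplaceN [')'] ['}'] c
              ('$' :: '{' :: pyReplaceN ['$', '('] ['$', '{'] o' r) = _
          rw [replaceClose_cons _ _ _ (by decide), replaceClose_cons _ _ _ (by decide),
            ih r.length hr o' c r rfl]
          simp
      · by_cases h2 : a = ')'
        · subst h2
          have hr : rest.length < n := by simp at hn; omega
          rw [replaceOpen_cons _ _ _ (by simp), altScan_eq_close]
          cases c with
          | zero =>
            rw [pyReplaceN_zero, if_neg (by omega)]
            have := ih rest.length hr o 0 rest rfl
            rw [pyReplaceN_zero] at this
            rw [this]
          | succ c' =>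
            rw [pyReplaceN_succ, if_pos (by simp [List.isPrefixOf]), if_pos (by omega)]
            have hdrop : (pyReplaceN ['$', '('] ['$', '{'] o rest).drop
                (([')'] : List Char).length - 1) = pyReplaceN ['$', '('] ['$', '{'] o rest := rfl
            rw [hdrop, ih rest.length hr o c' rest rfl]
            simp
        · have hr : rest.length < n := by simp at hn; omega
          rw [replaceOpen_cons _ _ _ h1, replaceClose_cons _ _ _ h2,
            altScan_eq_other _ _ _ _ h1 h2, ih rest.length hr o c rest rfl]

theorem prefix_iff₂ (l : List Char) (j : Nat) (a b : Char) :
    [a, b] <+: l.drop j ↔ l[j]? = some a ∧ l[j + 1]? = some b := by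
  have h0 : (l.drop j)[0]? = l[j]? := by simp
  have h1 : (l.drop j)[1]? = l[j + 1]? := by simp [List.getElem?_drop]
  rw [← h0, ← h1]
  cases hd : l.drop j with
  | nil => simp
  | cons x t =>
    cases t with
    | nil => simp [List.cons_prefix_cons, eq_comm]
    | cons y t' => simp [List.cons_prefix_cons, eq_comm]

theorem prefix_iff₁ (l : List Char) (j : Nat) (a : Char) :
    [a] <+: l.drop j ↔ l[j]? = some a := by
  have h0 : (l.drop j)[0]? = l[j]? := by simp
  rw [← h0]
  cases hd : l.drop j with
  | nil => simp
  | cons x t => simp [List.cons_prefix_cons, eq_comm]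

theorem mem_occIdxs (pat l : List Char) (j : Nat) (hpat : pat ≠ []) :
    j ∈ occIdxs pat l ↔ pat <+: l.drop j := by
  simp only [occIdxs, List.mem_filter, List.mem_range, List.isPrefixOf_iff_prefix]
  constructor
  · exact fun h => h.2
  · intro h
    refine ⟨?_, h⟩
    by_contra hj
    push_neg at hj
    rw [List.drop_eq_nil_of_le hj] at h
    exact hpat (List.prefix_nil.mp h)

theorem pairwise_occIdxs (pat l : List Char) : (occIdxs pat l).Pairwise (· < ·) :=
  (List.pairwise_lt_range).filter _

theorem not_prefix_of_lt_head (pat l : List Char) (i j : Nat) (rest : List Nat)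
    (hpat : pat ≠ []) (hocc : occIdxs pat l = i :: rest) (hj : j < i) :
    ¬ pat <+: l.drop j := by
  intro h
  have hmem : j ∈ occIdxs pat l := (mem_occIdxs pat l j hpat).mpr h
  rw [hocc] at hmem
  have hp := pairwise_occIdxs pat l
  rw [hocc] at hp
  rcases List.mem_cons.mp hmem with rfl | hm
  · omega
  · exact absurd (List.rel_of_pairwise_cons hp hm) (by omega)

theorem occIdxs_cons (pat : List Char) (a : Char) (l : List Char) :
    occIdxs pat (a :: l)
      = (if pat.isPrefixOf (a :: l) then [0] else []) ++ (occIdxs pat l).map (· + 1) := by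
  simp only [occIdxs, List.length_cons, List.range_succ_eq_map, List.filter_cons,
    List.filter_map, List.drop_succ_cons, Function.comp_def, List.drop_zero]
  split <;> simp

theorem find_eq_occHead (pat l : List Char) (hpat : pat ≠ []) :
    PySem.Chars.find l pat = ((occIdxs pat l).head?.elim (-1) (Nat.cast)) := by
  cases hocc : occIdxs pat l with
  | nil =>
    have hninf : ¬ pat <:+: l := by
      intro hinf
      obtain ⟨j, hj⟩ := (PySem.Chars.exists_prefix_drop_iff_isIn pat l).mpr
        ((PySem.Chars.isIn_iff_infix pat l).mpr hinf)
      have : j ∈ occIdxs pat l := (mem_occIdxs pat l j hpat).mpr hj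
      simp [hocc] at this
    simp [(PySem.Chars.find_eq_neg_one_iff l pat).mpr hninf]
  | cons i rest =>
    have hi : pat <+: l.drop i := by
      have : i ∈ occIdxs pat l := by rw [hocc]; exact List.mem_cons_self
      exact (mem_occIdxs pat l i hpat).mp this
    have hinf : pat <:+: l := by
      rw [← PySem.Chars.isIn_iff_infix, ← PySem.Chars.exists_prefix_drop_iff_isIn]
      exact ⟨i, hi⟩
    have hnn : 0 ≤ PySem.Chars.find l pat := (PySem.Chars.find_nonneg_iff l pat).mpr hinf
    obtain ⟨hpre, hmin⟩ := PySem.Chars.find_spec hnn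
    have hfi : (PySem.Chars.find l pat).toNat = i := by
      have h1 : ¬ i < (PySem.Chars.find l pat).toNat := fun h => hmin i h hi
      have h2 : ¬ (PySem.Chars.find l pat).toNat < i := fun h =>
        not_prefix_of_lt_head pat l i _ rest hpat hocc h hpre
      omega
    simp only [List.head?_cons, Option.elim_some]
    omega

theorem countgo_close (fuel : Nat) : ∀ (l : List Char) (acc : Nat), l.length ≤ fuel →
    PySem.Chars.count.go [')'] fuel l acc = acc + (occIdxs [')'] l).length := by
  induction fuel with
  | zero =>
    intro l acc h
    obtain rfl : l = [] := by cases l <;> simp_all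
    simp [PySem.Chars.count.go, occIdxs]
  | succ n ih =>
    intro l acc h
    cases l with
    | nil => simp [PySem.Chars.count.go, occIdxs]
    | cons a t =>
      rw [PySem.Chars.count.go, occIdxs_cons]
      by_cases hp : [')'].isPrefixOf (a :: t)
      · simp only [hp, if_true, List.length_cons]
        have hdr : List.drop (([] : List Char).length + 1) (a :: t) = t := rfl
        rw [hdr, ih t (acc + 1) (by simp at h; omega)]
        simp; omega
      · rw [if_neg hp, if_neg hp, ih t acc (by simp at h; omega)]
        simp

theorem countgo_open (fuel : Nat) : ∀ (l : List Char) (acc : Nat), l.length ≤ fuel →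
    PySem.Chars.count.go ['$', '('] fuel l acc = acc + (occIdxs ['$', '('] l).length := by
  induction fuel with
  | zero =>
    intro l acc h
    obtain rfl : l = [] := by cases l <;> simp_all
    simp [PySem.Chars.count.go, occIdxs]
  | succ n ih =>
    intro l acc h
    cases l with
    | nil => simp [PySem.Chars.count.go, occIdxs]
    | cons a t =>
      rw [PySem.Chars.count.go, occIdxs_cons]
      by_cases hp : ['$', '('].isPrefixOf (a :: t)
      · have ha : a = '$' := by
          have := (List.isPrefixOf_iff_prefix.mp hp)
          rcases List.cons_prefix_cons.mp this with ⟨rfl, _⟩; rfl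
        obtain ⟨t', rfl⟩ : ∃ t', t = '(' :: t' := by
          have := (List.isPrefixOf_iff_prefix.mp hp)
          rcases List.cons_prefix_cons.mp this with ⟨_, h2⟩
          cases t with
          | nil => simp at h2
          | cons b t' =>
            rcases List.cons_prefix_cons.mp h2 with ⟨rfl, _⟩
            exact ⟨t', rfl⟩
        simp only [hp, if_true]
        have hdrop : List.drop ['$', '('].length (a :: '(' :: t') = t' := rfl
        rw [hdrop, ih t' (acc + 1) (by simp at h; omega)]
        rw [occIdxs_cons]
        have : ¬ ['$', '('].isPrefixOf ('(' :: t') := by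
          intro hc
          rcases List.cons_prefix_cons.mp (List.isPrefixOf_iff_prefix.mp hc) with ⟨hh, _⟩
          simp at hh
        simp [this]; omega
      · rw [if_neg hp, if_neg hp, ih t acc (by simp at h; omega)]
        simp

theorem count_eq_occ_close (l : List Char) :
    PySem.Chars.count l [')'] = (occIdxs [')'] l).length := by
  have h : ¬ ([')'] : List Char).isEmpty = true := by decide
  simp [PySem.Chars.count, h, countgo_close l.length l 0 le_rfl]

theorem count_eq_occ_open (l : List Char) :
    PySem.Chars.count l ['$', '('] = (occIdxs ['$', '('] l).length := by
  have h : ¬ (['$', '('] : List Char).isEmpty = true := by decide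
  simp [PySem.Chars.count, h, countgo_open l.length l 0 le_rfl]

theorem altScan_zero (l : List Char) : altScan 0 0 l = l := by
  generalize hn : l.length = n
  induction n using Nat.strong_induction_on generalizing l with
  | _ n ih =>
    cases l with
    | nil => simp [altScan]
    | cons a rest =>
      by_cases h1 : a = '$' ∧ rest.head? = some '('
      · obtain ⟨rfl, hh⟩ := h1
        obtain ⟨rest', rfl⟩ : ∃ r, rest = '(' :: r := by
          cases rest with
          | nil => simp at hh
          | cons b r => simp at hh; exact ⟨r, by simp [hh]⟩
        rw [altScan_eq_open, if_neg (by omega), ih rest'.length (by simp [← hn]) rest' rfl]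
      · by_cases h2 : a = ')'
        · subst h2
          rw [altScan_eq_close, if_neg (by omega), ih rest.length (by simp [← hn]) rest rfl]
        · rw [altScan_eq_other _ _ _ _ h1 h2, ih rest.length (by simp [← hn]) rest rfl]

theorem altScan_append (o c : Nat) (u r : List Char)
    (hopen : ∀ j, j < u.length → ¬ ((u ++ r)[j]? = some '$' ∧ (u ++ r)[j + 1]? = some '('))
    (hclose : ')' ∉ u) :
    altScan o c (u ++ r) = u ++ altScan o c r := by
  induction u with
  | nil => simp
  | cons a u' ih =>
    rw [List.cons_append]
    have h1 : ¬ (a = '$' ∧ (u' ++ r).head? = some '(') := by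
      intro ⟨ha, hh⟩
      apply hopen 0 (by simp)
      refine ⟨by simp [ha], ?_⟩
      simpa [List.head?_eq_getElem?] using hh
    have h2 : a ≠ ')' := fun ha => hclose (by simp [ha])
    rw [altScan_eq_other _ _ _ _ h1 h2]
    rw [ih (fun j hj h => hopen (j + 1) (by simp; omega) (by simpa using h))
      (fun h => hclose (List.mem_cons_of_mem a h))]
    simp

theorem altScan_close_budget (o c : Nat) (x t : List Char) (hx : ')' ∉ x) (hc : 0 < c) :
    altScan o c (x ++ ')' :: t) = altScan o (c - 1) (x ++ '}' :: t) := by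
  generalize hn : x.length = n
  induction n using Nat.strong_induction_on generalizing x o with
  | _ n ih =>
    cases x with
    | nil =>
      simp only [List.nil_append]
      rw [altScan_eq_close, if_pos hc, altScan_eq_other _ _ _ _ (by simp) (by decide)]
    | cons a x' =>
      have ha : a ≠ ')' := fun h => hx (by simp [h])
      by_cases hm : a = '$' ∧ x'.head? = some '('
      · obtain ⟨rfl, hh⟩ := hm
        obtain ⟨x'', rfl⟩ : ∃ x'', x' = '(' :: x'' := by
          cases x' with
          | nil => simp at hh
          | cons b x'' => simp at hh; exact ⟨x'', by simp [hh]⟩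
        have hx'' : ')' ∉ x'' := fun h => hx (by simp [h])
        have hlt : x''.length < n := by simp at hn; omega
        simp only [List.cons_append]
        rw [altScan_eq_open, altScan_eq_open]
        have hIH1 := ih x''.length hlt (o - 1) x'' hx'' rfl
        have hIH0 := ih x''.length hlt o x'' hx'' rfl
        by_cases ho : 0 < o <;> simp [ho, hIH1, hIH0]
      · have hx' : ')' ∉ x' := fun h => hx (by simp [h])
        have hlt : x'.length < n := by simp at hn; omega
        simp only [List.cons_append]
        have hc1 : ¬ (a = '$' ∧ (x' ++ ')' :: t).head? = some '(') := by
          rintro ⟨rfl, hh⟩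
          cases x' with
          | nil => simp at hh
          | cons b x'' => simp at hh; exact hm ⟨rfl, by simp [hh]⟩
        have hc1' : ¬ (a = '$' ∧ (x' ++ '}' :: t).head? = some '(') := by
          rintro ⟨rfl, hh⟩
          cases x' with
          | nil => simp at hh
          | cons b x'' => simp at hh; exact hm ⟨rfl, by simp [hh]⟩
        rw [altScan_eq_other _ _ _ _ hc1 ha, altScan_eq_other _ _ _ _ hc1' ha,
          ih x'.length hlt o x' hx' rfl]

-- the rewritten string, elementwise: only positions |u|+1 ('('→'{') and |u|+2+|x| (')'→'}') change
theorem getElem?_step (u x t : List Char) (k : Nat) :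
    (u ++ '$' :: '{' :: (x ++ '}' :: t))[k]? =
      if k = u.length + 1 then some '{'
      else if k = u.length + 2 + x.length then some '}'
      else (u ++ '$' :: '(' :: (x ++ ')' :: t))[k]? := by
  by_cases hk : k < u.length
  · rw [List.getElem?_append_left hk, List.getElem?_append_left hk,
      if_neg (by omega), if_neg (by omega)]
  · push_neg at hk
    rw [List.getElem?_append_right hk, List.getElem?_append_right hk]
    set r := k - u.length with hr
    match hr2 : r with
    | 0 => rw [if_neg (by omega), if_neg (by omega)]; rfl
    | 1 => rw [if_pos (by omega)]; rfl
    | r' + 2 =>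
      rw [show (('$' :: '{' :: (x ++ '}' :: t)))[r' + 2]? = (x ++ '}' :: t)[r']? from rfl,
        show (('$' :: '(' :: (x ++ ')' :: t)))[r' + 2]? = (x ++ ')' :: t)[r']? from rfl,
        if_neg (by omega)]
      by_cases hx : r' < x.length
      · rw [List.getElem?_append_left hx, List.getElem?_append_left hx, if_neg (by omega)]
      · push_neg at hx
        rw [List.getElem?_append_right hx, List.getElem?_append_right hx]
        match hr3 : r' - x.length with
        | 0 => rw [if_pos (by omega)]; rfl
        | s + 1 => rw [if_neg (by omega)]; rfl

theorem length_step (u x t : List Char) :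
    (u ++ '$' :: '{' :: (x ++ '}' :: t)).length = (u ++ '$' :: '(' :: (x ++ ')' :: t)).length := by
  simp

-- one A-step removes exactly the first "$(" occurrence and the first ")" occurrence
theorem occ_step (u x t : List Char) (o' c' : List Nat)
    (hoccO : occIdxs ['$', '('] (u ++ '$' :: '(' :: (x ++ ')' :: t)) = u.length :: o')
    (hoccC : occIdxs [')'] (u ++ '$' :: '(' :: (x ++ ')' :: t)) = (u.length + 2 + x.length) :: c') :
    occIdxs ['$', '('] (u ++ '$' :: '{' :: (x ++ '}' :: t)) = o' ∧
      occIdxs [')'] (u ++ '$' :: '{' :: (x ++ '}' :: t)) = c' := by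
  have hchO1 : (u ++ '$' :: '(' :: (x ++ ')' :: t))[u.length + 1]? = some '(' := by
    rw [List.getElem?_append_right (by omega : u.length ≤ u.length + 1)]
    have h : u.length + 1 - u.length = 1 := by omega
    rw [h]; rfl
  have hchC : (u ++ '$' :: '(' :: (x ++ ')' :: t))[u.length + 2 + x.length]? = some ')' := by
    rw [List.getElem?_append_right (by omega : u.length ≤ u.length + 2 + x.length)]
    have h : u.length + 2 + x.length - u.length = x.length + 2 := by omega
    rw [h, show ('$' :: '(' :: (x ++ ')' :: t))[x.length + 2]? = (x ++ ')' :: t)[x.length]? from rfl,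
      List.getElem?_append_right (le_refl _), Nat.sub_self]
    rfl
  constructor
  · have hpt : occIdxs ['$', '('] (u ++ '$' :: '{' :: (x ++ '}' :: t)) =
        (occIdxs ['$', '('] (u ++ '$' :: '(' :: (x ++ ')' :: t))).filter (fun k => !(k == u.length)) := by
      simp only [occIdxs, List.filter_filter]
      rw [length_step]
      apply List.filter_congr
      intro k _
      rw [Bool.eq_iff_iff]
      simp only [Bool.and_eq_true, Bool.not_eq_eq_eq_not, Bool.not_true, beq_eq_false_iff_ne,
        List.isPrefixOf_iff_prefix, prefix_iff₂, ne_eq]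
      have hk0 := getElem?_step u x t k
      have hk1 := getElem?_step u x t (k + 1)
      constructor
      · rintro ⟨h1, h2⟩
        rw [hk0] at h1
        rw [hk1] at h2
        split_ifs at h1 with e1 e2
        · exact absurd h1 (by simp)
        · exact absurd h1 (by simp)
        · split_ifs at h2 with e3 e4
          · exact absurd h2 (by simp)
          · exact absurd h2 (by simp)
          · exact ⟨(by omega), h1, h2⟩
      · rintro ⟨hne, h1, h2⟩
        rw [hk0, hk1]
        have hki1 : k ≠ u.length + 1 := by
          intro h; rw [h, hchO1] at h1; simp at h1
        have hke : k ≠ u.length + 2 + x.length := by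
          intro h; rw [h, hchC] at h1; simp at h1
        have hk1e : k + 1 ≠ u.length + 2 + x.length := by
          intro h; rw [h, hchC] at h2; simp at h2
        rw [if_neg hki1, if_neg hke, if_neg (by omega), if_neg hk1e]
        exact ⟨h1, h2⟩
    rw [hpt, hoccO, List.filter_cons_of_neg (by simp)]
    apply List.filter_eq_self.mpr
    intro k hk
    have hp := pairwise_occIdxs ['$', '('] (u ++ '$' :: '(' :: (x ++ ')' :: t))
    rw [hoccO] at hp
    have := List.rel_of_pairwise_cons hp hk
    simp; omega
  · have hpt : occIdxs [')'] (u ++ '$' :: '{' :: (x ++ '}' :: t)) =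
        (occIdxs [')'] (u ++ '$' :: '(' :: (x ++ ')' :: t))).filter
          (fun k => !(k == u.length + 2 + x.length)) := by
      simp only [occIdxs, List.filter_filter]
      rw [length_step]
      apply List.filter_congr
      intro k _
      rw [Bool.eq_iff_iff]
      simp only [Bool.and_eq_true, Bool.not_eq_eq_eq_not, Bool.not_true, beq_eq_false_iff_ne,
        List.isPrefixOf_iff_prefix, prefix_iff₁, ne_eq]
      have hk0 := getElem?_step u x t k
      constructor
      · intro h1
        rw [hk0] at h1
        split_ifs at h1 with e1 e2
        · exact absurd h1 (by simp)
        · exact absurd h1 (by simp)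
        · exact ⟨e2, h1⟩
      · rintro ⟨hne, h1⟩
        rw [hk0]
        have hki1 : k ≠ u.length + 1 := by
          intro h; rw [h, hchO1] at h1; simp at h1
        rw [if_neg hki1, if_neg hne]
        exact h1
    rw [hpt, hoccC, List.filter_cons_of_neg (by simp)]
    apply List.filter_eq_self.mpr
    intro k hk
    have hp := pairwise_occIdxs [')'] (u ++ '$' :: '(' :: (x ++ ')' :: t))
    rw [hoccC] at hp
    have := List.rel_of_pairwise_cons hp hk
    simp; omega

-- the main induction: under Pre_, A's recursion computes the simultaneous scan
theorem goA_eq (fuel : Nat) : ∀ (l : List Char),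
    (∀ pr ∈ (occIdxs ['$', '('] l).zip (occIdxs [')'] l), pr.1 < pr.2) →
    min (occIdxs ['$', '('] l).length (occIdxs [')'] l).length < fuel →
    goA fuel l = altScan (min (occIdxs ['$', '('] l).length (occIdxs [')'] l).length)
      (min (occIdxs ['$', '('] l).length (occIdxs [')'] l).length) l := by
  induction fuel with
  | zero => intro l _ h; omega
  | succ f ih =>
    intro l hpre hlt
    cases hoccO : occIdxs ['$', '('] l with
    | nil =>
      have hfO : PySem.Chars.find l ['$', '('] = -1 := by
        rw [find_eq_occHead _ _ (by decide), hoccO]; rfl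
      rw [goA]
      simp only [hfO, hoccO]
      rw [if_pos (by decide)]
      simp [altScan_zero]
    | cons i o' =>
      have hfO : PySem.Chars.find l ['$', '('] = (i : Int) := by
        rw [find_eq_occHead _ _ (by decide), hoccO]; rfl
      cases hoccC : occIdxs [')'] l with
      | nil =>
        have hfC : PySem.Chars.find l [')'] = -1 := by
          rw [find_eq_occHead _ _ (by decide), hoccC]; rfl
        rw [goA]
        simp only [hfO, hfC]
        rw [if_neg (by omega : ¬ ((i : Int) < 0)), if_pos (by decide : (-1 : Int) < 0)]
        simp [altScan_zero]
      | cons e c' =>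
        have hfC : PySem.Chars.find l [')'] = (e : Int) := by
          rw [find_eq_occHead _ _ (by decide), hoccC]; rfl
        have hie : i < e := by
          have : ((i, e) : Nat × Nat) ∈ (occIdxs ['$', '('] l).zip (occIdxs [')'] l) := by
            rw [hoccO, hoccC]; exact List.mem_cons_self
          exact hpre _ this
        have hiMem : ['$', '('] <+: l.drop i := by
          have : i ∈ occIdxs ['$', '('] l := by rw [hoccO]; exact List.mem_cons_self
          exact (mem_occIdxs _ _ _ (by decide)).mp this
        have heMem : [')'] <+: l.drop e := by
          have : e ∈ occIdxs [')'] l := by rw [hoccC]; exact List.mem_cons_self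
          exact (mem_occIdxs _ _ _ (by decide)).mp this
        obtain ⟨hchi, hchi1⟩ := (prefix_iff₂ l i '$' '(').mp hiMem
        have hche := (prefix_iff₁ l e ')').mp heMem
        have hi1n : i + 1 < l.length := by
          obtain ⟨h, -⟩ := List.getElem?_eq_some_iff.mp hchi1; omega
        have hen : e < l.length := by
          obtain ⟨h, -⟩ := List.getElem?_eq_some_iff.mp hche; omega
        have hei2 : i + 2 ≤ e := by
          have h1 : e ≠ i := by
            intro h; rw [h, hchi] at hche; simp at hche
          have h2 : e ≠ i + 1 := by
            intro h; rw [h, hchi1] at hche; simp at hche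
          omega
        -- decomposition  l = u ++ '$' :: '(' :: (x ++ ')' :: t)
        set u := l.take i with hu
        set x := (l.drop (i + 2)).take (e - (i + 2)) with hxdef
        set t := l.drop (e + 1) with ht
        have hulen : u.length = i := by rw [hu, List.length_take]; omega
        have hxlen : x.length = e - (i + 2) := by
          rw [hxdef, List.length_take, List.length_drop]; omega
        have hdecomp : l = u ++ '$' :: '(' :: (x ++ ')' :: t) := by
          have d1 : l.drop i = '$' :: l.drop (i + 1) := by
            obtain ⟨h, heq⟩ := List.getElem?_eq_some_iff.mp hchi
            rw [List.drop_eq_getElem_cons (by omega : i < l.length), heq]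
          have d2 : l.drop (i + 1) = '(' :: l.drop (i + 2) := by
            obtain ⟨h, heq⟩ := List.getElem?_eq_some_iff.mp hchi1
            rw [List.drop_eq_getElem_cons (by omega : i + 1 < l.length), heq]
          have d3 : l.drop e = ')' :: t := by
            obtain ⟨h, heq⟩ := List.getElem?_eq_some_iff.mp hche
            rw [List.drop_eq_getElem_cons (by omega : e < l.length), heq, ht]
          have d4 : l.drop (i + 2) = x ++ ')' :: t := by
            conv_lhs => rw [← List.take_append_drop (e - (i + 2)) (l.drop (i + 2))]
            rw [← hxdef, List.drop_drop]
            have h5 : i + 2 + (e - (i + 2)) = e := by omega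
            rw [h5, d3]
          conv_lhs => rw [← List.take_append_drop i l, d1, d2, d4]
        -- minimality of i and e
        have hminO : ∀ k, k < i → ¬ (l[k]? = some '$' ∧ l[k + 1]? = some '(') := by
          intro k hk hcontra
          exact not_prefix_of_lt_head _ l i k o' (by decide) hoccO hk
            ((prefix_iff₂ l k '$' '(').mpr hcontra)
        have hminC : ∀ k, k < e → ¬ (l[k]? = some ')') := by
          intro k hk hcontra
          exact not_prefix_of_lt_head _ l e k c' (by decide) hoccC hk
            ((prefix_iff₁ l k ')').mpr hcontra)
        have hcloseU : ')' ∉ u := by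
          intro hmem
          rw [hu] at hmem
          obtain ⟨k, hk, heq⟩ := List.mem_iff_getElem.mp hmem
          rw [List.length_take] at hk
          have hkl : k < i := by omega
          apply hminC k (by omega)
          rw [List.getElem_take] at heq
          exact List.getElem?_eq_some_iff.mpr ⟨by omega, heq⟩
        have hclosex : ')' ∉ x := by
          intro hmem
          rw [hxdef] at hmem
          obtain ⟨k, hk, heq⟩ := List.mem_iff_getElem.mp hmem
          rw [List.length_take, List.length_drop] at hk
          have hkl : k < e - (i + 2) := by omega
          apply hminC (i + 2 + k) (by omega)
          rw [List.getElem_take, List.getElem_drop] at heq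
          exact List.getElem?_eq_some_iff.mpr ⟨by omega, heq⟩
        set s' := u ++ '$' :: '{' :: (x ++ '}' :: t) with hs'
        have hoccO' : occIdxs ['$', '('] l = u.length :: o' := by rw [hoccO, hulen]
        have hoccC' : occIdxs [')'] l = (u.length + 2 + x.length) :: c' := by
          rw [hoccC]
          congr 1
          omega
        obtain ⟨hOs, hCs⟩ := occ_step u x t o' c' (by rw [← hdecomp]; exact hoccO')
          (by rw [← hdecomp]; exact hoccC')
        -- one unfolding of goA
        have hstep : goA (f + 1) l = goA f s' := by
          rw [goA]
          simp only [hfO, hfC]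
          rw [if_neg (by omega : ¬ ((i : Int) < 0)), if_neg (by omega : ¬ ((e : Int) < 0))]
          have hsl1 : PySem.List.slice l none (some (i : Int)) = u :=
            PySem.List.slice_to_natCast l i
          have hsl2 : PySem.List.slice l (some ((i : Int) + 2)) (some (e : Int)) = x := by
            have hcast : ((i : Int) + 2) = ((i + 2 : Nat) : Int) := by push_cast; ring
            rw [hcast, PySem.List.slice_natCast]
          have hsl3 : PySem.List.slice l (some ((e : Int) + 1)) none = t := by
            have hcast : ((e : Int) + 1) = ((e + 1 : Nat) : Int) := by push_cast; ring
            rw [hcast, PySem.List.slice_from_natCast]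
          rw [hsl1, hsl2, hsl3]
          congr 1
          rw [hs']
          simp
        have hopenU : ∀ j, j < u.length → ¬ ((u ++ ('$' :: '(' :: (x ++ ')' :: t)))[j]? = some '$' ∧
            (u ++ ('$' :: '(' :: (x ++ ')' :: t)))[j + 1]? = some '(') := by
          intro j hj
          rw [← hdecomp]
          exact hminO j (by omega)
        have hopenU' : ∀ j, j < u.length → ¬ ((u ++ ('$' :: '{' :: (x ++ '}' :: t)))[j]? = some '$' ∧
            (u ++ ('$' :: '{' :: (x ++ '}' :: t)))[j + 1]? = some '(') := by
          intro j hj hcontra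
          obtain ⟨h1, h2⟩ := hcontra
          rw [getElem?_step u x t j, if_neg (by omega), if_neg (by omega), ← hdecomp] at h1
          rw [getElem?_step u x t (j + 1), if_neg (by omega), if_neg (by omega), ← hdecomp] at h2
          exact hminO j (by omega) ⟨h1, h2⟩
        set m' := min o'.length c'.length with hm'
        have hR : altScan (m' + 1) (m' + 1) l = u ++ '$' :: '{' :: altScan m' m' (x ++ '}' :: t) := by
          conv_lhs => rw [hdecomp]
          rw [altScan_append _ _ _ _ hopenU hcloseU, altScan_eq_open, if_pos (by omega)]
          have hsub : m' + 1 - 1 = m' := by omega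
          rw [hsub, altScan_close_budget m' (m' + 1) x t hclosex (by omega), hsub]
        have hL : altScan m' m' s' = u ++ '$' :: '{' :: altScan m' m' (x ++ '}' :: t) := by
          rw [hs', altScan_append _ _ _ _ hopenU' hcloseU,
            altScan_eq_other _ _ _ _ (by simp) (by decide),
            altScan_eq_other _ _ _ _ (by simp) (by decide)]
        have hihs := ih s' (by
            rw [hOs, hCs]
            intro pr hpr
            apply hpre
            rw [hoccO, hoccC, List.zip_cons_cons]
            exact List.mem_cons_of_mem _ hpr)
          (by
            rw [hOs, hCs]
            rw [hoccO, hoccC] at hlt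
            simp only [List.length_cons] at hlt
            omega)
        rw [hOs, hCs] at hihs
        simp only [List.length_cons]
        have hmm : min (o'.length + 1) (c'.length + 1) = m' + 1 := by omega
        rw [hstep, hihs, hmm, hR, ← hm', hL]

-- ===== VERDICT (by name: the statement is the Claim_ definition above) =====
theorem ChangeToCMakeVariables_spec : Claim_equal_ChangeToCMakeVariables := by
  intro path _ hpre
  show ChangeToCMakeVariables path = ChangeToCMakeVariables_alt path
  unfold ChangeToCMakeVariables ChangeToCMakeVariables_alt
  simp only [count_eq_occ_open, count_eq_occ_close]
  rw [replace_replace_eq_altScan]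
  congr 1
  apply goA_eq (path.toList.length + 1) path.toList hpre
  have h1 : (occIdxs [')'] path.toList).length ≤ path.toList.length := by
    have h2 := List.length_filter_le
      (fun j => ([')'] : List Char).isPrefixOf (path.toList.drop j))
      (List.range path.toList.length)
    simpa [occIdxs] using h2
  omega
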